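-- pv_equiv track=rewrite | github.com/Victor-Fiamoncini/trab_pad_genetic | src/main.py | punnett
-- ===== SOURCE A (Python) =====
-- from itertools import groupby, product
--
-- def allele(e):
--   allele = []
--
--   for _, v in groupby(e, key=str.lower):
--     allele.append(list(v))
--
--   return allele
--
-- def punnett(a, b):
--   permutations = []
--
--   for e in product(
--     *(
--       [''.join(e) for e in product(*e)]
--       for e in zip(allele(a), allele(b))
--     )
--   ):
--     permutations.append(''.join(e))
--
--   return permutations
-- ===== SOURCE B (Python) =====
-- def punnett(a, b):
--     def groups(s):
--         if not s:
--             return []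
--         rest = groups(s[1:])
--         if rest and rest[0][0].lower() == s[0].lower():
--             return [[s[0]] + rest[0]] + rest[1:]
--         return [[s[0]]] + rest
--
--     acc = ['']
--     for ga, gb in zip(groups(a), groups(b)):
--         gene = [x + y for x in ga for y in gb]
--         acc = [p + c for p in acc for c in gene]
--     return acc
-- ===== Notes on version B (the rewrite author's own statement) =====
-- stated objective: alternative
-- what changed: B replaces itertools.product over the per-gene combo lists by a left fold with a [''] accumulator extended gene by gene, and groups alleles by structural recursion on the string instead of itertools.groupby.
import Mathlib
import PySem

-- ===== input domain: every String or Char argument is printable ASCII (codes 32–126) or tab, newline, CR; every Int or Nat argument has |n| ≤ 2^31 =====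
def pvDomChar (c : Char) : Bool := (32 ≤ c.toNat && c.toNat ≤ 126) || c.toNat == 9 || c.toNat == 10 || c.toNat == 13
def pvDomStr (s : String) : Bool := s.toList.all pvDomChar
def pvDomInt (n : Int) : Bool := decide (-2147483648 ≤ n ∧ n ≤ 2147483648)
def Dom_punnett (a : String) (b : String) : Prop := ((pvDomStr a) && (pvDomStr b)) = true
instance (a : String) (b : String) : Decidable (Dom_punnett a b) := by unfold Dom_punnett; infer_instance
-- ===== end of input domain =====

-- B replaces itertools.product over the per-gene combo lists by a left fold with a [''] accumulator
-- (and groups alleles by a structural recursion instead of groupby); objective: alternative decomposition, same cost.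

-- str.lower on a single character (exact on the ASCII domain)
def pvLow (c : Char) : Char := PySem.Chars.lowerChar c

-- ===== PORT A =====
-- groupby(e, key=str.lower) materialised group by group
def alleleA : List Char → List (List Char)
  | [] => []
  | c :: rest =>
    (c :: rest.takeWhile (fun d => pvLow d == pvLow c)) ::
      alleleA (rest.dropWhile (fun d => pvLow d == pvLow c))
termination_by l => l.length
decreasing_by
  simpa using Nat.lt_succ_of_le (List.length_dropWhile_le _ rest)

-- [''.join(e) for e in product(ga, gb)]  (shared: both Pythons contain this same comprehension)
def pairJoin (ga gb : List Char) : List String :=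
  ga.flatMap (fun x => gb.map (fun y => String.ofList [x, y]))

-- itertools.product(*lists)
def pyProduct : List (List String) → List (List String)
  | [] => [[]]
  | xs :: rest => xs.flatMap (fun x => (pyProduct rest).map (x :: ·))

-- ''.join
def joinStr : List String → String
  | [] => ""
  | x :: t => x ++ joinStr t

def punnett (a : String) (b : String) : List String :=
  (pyProduct (((alleleA a.toList).zip (alleleA b.toList)).map
      (fun p => pairJoin p.1 p.2))).map joinStr

-- ===== PORT B =====
-- groups(s): recursion on the string, merging the head char into the first group of the tail's groups
def groupsB : List Char → List (List Char)
  | [] => []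
  | c :: rest =>
    match groupsB rest with
    | (d :: g) :: gs =>
      if pvLow d == pvLow c then (c :: d :: g) :: gs else [c] :: (d :: g) :: gs
    | gs => [c] :: gs

def punnett_alt (a : String) (b : String) : List String :=
  ((groupsB a.toList).zip (groupsB b.toList)).foldl
    (fun acc p => acc.flatMap (fun pre => (pairJoin p.1 p.2).map (fun c => pre ++ c))) [""]

-- ===== PRECONDITION & SPEC =====
def Spec_punnett (a : String) (b : String) (out : List String) : Prop := out = punnett_alt a b
instance (a : String) (b : String) (out : List String) : Decidable (Spec_punnett a b out) := by unfold Spec_punnett; infer_instance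

-- ===== CLAIM (what is proved, stated in full; the proofs are below) =====
def Claim_equal_punnett : Prop := ∀ (a : String) (b : String), Dom_punnett a b → Spec_punnett a b (punnett a b)

-- ===== LEMMAS AND PROOFS =====

theorem groupsB_eq (l : List Char) : groupsB l = alleleA l := by
  induction l with
  | nil => simp [groupsB, alleleA]
  | cons c rest ih =>
    rw [groupsB, ih]
    cases hr : rest with
    | nil => simp [alleleA]
    | cons d rest' =>
      rw [alleleA]
      by_cases h : pvLow d = pvLow c
      · have hfun : (fun x => pvLow x == pvLow d) = (fun x => pvLow x == pvLow c) := by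
          funext x; rw [h]
        rw [hfun]; simp [alleleA, h]
      · have hb : (pvLow d == pvLow c) = false := by simpa using h
        simp [alleleA, hb]

theorem fold_eq (genes : List (List String)) (acc : List String) :
    genes.foldl (fun acc g => acc.flatMap (fun pre => g.map (fun c => pre ++ c))) acc
      = acc.flatMap (fun p => (pyProduct genes).map (fun t => p ++ joinStr t)) := by
  induction genes generalizing acc with
  | nil => simp [pyProduct, joinStr]
  | cons g rest ih =>
    rw [List.foldl_cons, ih, pyProduct]
    simp [List.flatMap_assoc, List.flatMap_map, List.map_flatMap, List.map_map, joinStr, String.append_assoc, Function.comp_def]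

-- ===== VERDICT (by name: the statement is the Claim_ definition above) =====
theorem punnett_spec : Claim_equal_punnett := by
  intro a b _
  unfold Spec_punnett punnett punnett_alt
  rw [groupsB_eq, groupsB_eq,
    ← List.foldl_map (f := fun p : List Char × List Char => pairJoin p.1 p.2)
      (g := fun (acc : List String) g => acc.flatMap (fun pre => g.map (fun c => pre ++ c))),
    fold_eq]
  simp
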